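-- pv_equiv track=rewrite | github.com/lindsaygross/AIAudit | src/remediation/mapping.py | get_article_keywords
-- ===== SOURCE A (Python) =====
-- from typing import Dict, List, Set, Tuple
--
-- KEYWORD_MAP: Dict[str, List[Tuple[str, float]]] = {
--     # Article 9 - Risk Management
--     "risk management": [("Article_9", 1.0)],
--     "risk assessment": [("Article_9", 0.9)],
--     "risk mitigation": [("Article_9", 0.9)],
--     "residual risk": [("Article_9", 0.8)],
--     "risk monitoring": [("Article_9", 0.8)],
--     "hazard": [("Article_9", 0.6)],
--     "safety": [("Article_9", 0.5)],
--
--     # Article 10 - Data Governance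
--     "training data": [("Article_10", 1.0)],
--     "data governance": [("Article_10", 1.0)],
--     "data quality": [("Article_10", 0.9)],
--     "bias": [("Article_10", 0.9), ("Article_9", 0.5)],
--     "fairness": [("Article_10", 0.8), ("Article_9", 0.4)],
--     "representative": [("Article_10", 0.8)],
--     "dataset": [("Article_10", 0.7)],
--     "annotation": [("Article_10", 0.6)],
--     "labeling": [("Article_10", 0.6)],
--     "data collection": [("Article_10", 0.7)],
--     "consent": [("Article_10", 0.5)],
--
--     # Article 12 - Record Keeping
--     "logging": [("Article_12", 1.0)],
--     "audit trail": [("Article_12", 1.0)],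
--     "traceability": [("Article_12", 0.9)],
--     "record keeping": [("Article_12", 1.0)],
--     "log retention": [("Article_12", 0.9)],
--     "audit": [("Article_12", 0.7)],
--     "documentation": [("Article_12", 0.6)],
--     "versioning": [("Article_12", 0.5)],
--
--     # Article 14 - Human Oversight
--     "human oversight": [("Article_14", 1.0)],
--     "human-in-the-loop": [("Article_14", 1.0)],
--     "human review": [("Article_14", 0.9)],
--     "manual review": [("Article_14", 0.8)],
--     "override": [("Article_14", 0.8)],
--     "intervention": [("Article_14", 0.7)],
--     "supervision": [("Article_14", 0.7)],
--     "escalation": [("Article_14", 0.6)],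
--     "approval": [("Article_14", 0.5)],
--     "operator": [("Article_14", 0.4)],
--
--     # Article 15 - Accuracy, Robustness, Cybersecurity
--     "accuracy": [("Article_15", 0.9)],
--     "robustness": [("Article_15", 1.0)],
--     "cybersecurity": [("Article_15", 1.0)],
--     "security": [("Article_15", 0.8)],
--     "adversarial": [("Article_15", 0.9)],
--     "attack": [("Article_15", 0.7)],
--     "vulnerability": [("Article_15", 0.8)],
--     "encryption": [("Article_15", 0.6)],
--     "integrity": [("Article_15", 0.7)],
--     "availability": [("Article_15", 0.5)],
--     "reliability": [("Article_15", 0.6)],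
--     "testing": [("Article_15", 0.5), ("Article_9", 0.4)],
--
--     # High-risk indicators (boost Article 9)
--     "biometric": [("Article_9", 0.8), ("Article_10", 0.6)],
--     "facial recognition": [("Article_9", 0.9), ("Article_10", 0.7)],
--     "law enforcement": [("Article_9", 0.9)],
--     "critical infrastructure": [("Article_9", 0.8)],
--     "employment": [("Article_9", 0.7), ("Article_10", 0.6)],
--     "credit scoring": [("Article_9", 0.8), ("Article_10", 0.6)],
--     "healthcare": [("Article_9", 0.7), ("Article_15", 0.6)],
--     "education": [("Article_9", 0.6), ("Article_10", 0.5)],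
--     "migration": [("Article_9", 0.7)],
--     "autonomous": [("Article_14", 0.7), ("Article_15", 0.6)],
-- }
--
-- def get_article_keywords(article: str) -> List[str]:
--     """
--     Get all keywords associated with a specific article.
--
--     Args:
--         article: Article name (e.g., "Article_9").
--
--     Returns:
--         List of keywords that map to this article.
--     """
--     keywords = []
--     for keyword, mappings in KEYWORD_MAP.items():
--         for art, weight in mappings:
--             if art == article:
--                 keywords.append(keyword)
--                 break
--     return keywords
-- ===== SOURCE B (Python) =====
-- from typing import Dict, List
--
-- # Precomputed reverse index (article -> keywords), materialized once from KEYWORD_MAP's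
-- # per-keyword article mappings; keywords appear in KEYWORD_MAP insertion order,
-- # each at most once per article.
-- _ARTICLE_INDEX: Dict[str, List[str]] = {
--     'Article_9': ['risk management', 'risk assessment', 'risk mitigation', 'residual risk', 'risk monitoring', 'hazard', 'safety', 'bias', 'fairness', 'testing', 'biometric', 'facial recognition', 'law enforcement', 'critical infrastructure', 'employment', 'credit scoring', 'healthcare', 'education', 'migration'],
--     'Article_10': ['training data', 'data governance', 'data quality', 'bias', 'fairness', 'representative', 'dataset', 'annotation', 'labeling', 'data collection', 'consent', 'biometric', 'facial recognition', 'employment', 'credit scoring', 'education'],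
--     'Article_12': ['logging', 'audit trail', 'traceability', 'record keeping', 'log retention', 'audit', 'documentation', 'versioning'],
--     'Article_14': ['human oversight', 'human-in-the-loop', 'human review', 'manual review', 'override', 'intervention', 'supervision', 'escalation', 'approval', 'operator', 'autonomous'],
--     'Article_15': ['accuracy', 'robustness', 'cybersecurity', 'security', 'adversarial', 'attack', 'vulnerability', 'encryption', 'integrity', 'availability', 'reliability', 'testing', 'healthcare', 'autonomous'],
-- }
--
--
-- def get_article_keywords(article: str) -> List[str]:
--     """Get all keywords associated with a specific article (O(result) lookup)."""
--     return list(_ARTICLE_INDEX.get(article, []))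
-- ===== Notes on version B (the rewrite author's own statement) =====
-- stated objective: faster
-- what changed: Instead of scanning all of KEYWORD_MAP on every call (an inner loop over each keyword's mappings), B keeps a precomputed reverse index constant (article -> list of keywords) and the function is a single dict lookup returning a copy of that list.
import Mathlib
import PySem

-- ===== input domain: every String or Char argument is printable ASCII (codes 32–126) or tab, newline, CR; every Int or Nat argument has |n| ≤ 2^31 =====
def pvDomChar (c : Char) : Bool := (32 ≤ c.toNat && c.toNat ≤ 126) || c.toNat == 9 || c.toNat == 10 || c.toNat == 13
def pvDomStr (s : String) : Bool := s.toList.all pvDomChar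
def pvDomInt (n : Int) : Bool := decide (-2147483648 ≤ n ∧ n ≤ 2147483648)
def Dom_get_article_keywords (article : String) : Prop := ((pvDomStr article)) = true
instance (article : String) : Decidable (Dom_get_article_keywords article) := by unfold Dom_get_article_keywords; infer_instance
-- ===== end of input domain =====

-- B replaces A's per-call scan of KEYWORD_MAP with a precomputed reverse-index constant
-- (article -> keywords) and a single dict lookup (objective: faster per call).
-- The unused float weights of KEYWORD_MAP are ported as Int tenths; they never affect the result.

-- ===== PORT A =====
def KEYWORD_MAP : List (String × List (String × Int)) := [
  ("risk management", [("Article_9", 10)]),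
  ("risk assessment", [("Article_9", 9)]),
  ("risk mitigation", [("Article_9", 9)]),
  ("residual risk", [("Article_9", 8)]),
  ("risk monitoring", [("Article_9", 8)]),
  ("hazard", [("Article_9", 6)]),
  ("safety", [("Article_9", 5)]),
  ("training data", [("Article_10", 10)]),
  ("data governance", [("Article_10", 10)]),
  ("data quality", [("Article_10", 9)]),
  ("bias", [("Article_10", 9), ("Article_9", 5)]),
  ("fairness", [("Article_10", 8), ("Article_9", 4)]),
  ("representative", [("Article_10", 8)]),
  ("dataset", [("Article_10", 7)]),
  ("annotation", [("Article_10", 6)]),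
  ("labeling", [("Article_10", 6)]),
  ("data collection", [("Article_10", 7)]),
  ("consent", [("Article_10", 5)]),
  ("logging", [("Article_12", 10)]),
  ("audit trail", [("Article_12", 10)]),
  ("traceability", [("Article_12", 9)]),
  ("record keeping", [("Article_12", 10)]),
  ("log retention", [("Article_12", 9)]),
  ("audit", [("Article_12", 7)]),
  ("documentation", [("Article_12", 6)]),
  ("versioning", [("Article_12", 5)]),
  ("human oversight", [("Article_14", 10)]),
  ("human-in-the-loop", [("Article_14", 10)]),
  ("human review", [("Article_14", 9)]),
  ("manual review", [("Article_14", 8)]),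
  ("override", [("Article_14", 8)]),
  ("intervention", [("Article_14", 7)]),
  ("supervision", [("Article_14", 7)]),
  ("escalation", [("Article_14", 6)]),
  ("approval", [("Article_14", 5)]),
  ("operator", [("Article_14", 4)]),
  ("accuracy", [("Article_15", 9)]),
  ("robustness", [("Article_15", 10)]),
  ("cybersecurity", [("Article_15", 10)]),
  ("security", [("Article_15", 8)]),
  ("adversarial", [("Article_15", 9)]),
  ("attack", [("Article_15", 7)]),
  ("vulnerability", [("Article_15", 8)]),
  ("encryption", [("Article_15", 6)]),
  ("integrity", [("Article_15", 7)]),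
  ("availability", [("Article_15", 5)]),
  ("reliability", [("Article_15", 6)]),
  ("testing", [("Article_15", 5), ("Article_9", 4)]),
  ("biometric", [("Article_9", 8), ("Article_10", 6)]),
  ("facial recognition", [("Article_9", 9), ("Article_10", 7)]),
  ("law enforcement", [("Article_9", 9)]),
  ("critical infrastructure", [("Article_9", 8)]),
  ("employment", [("Article_9", 7), ("Article_10", 6)]),
  ("credit scoring", [("Article_9", 8), ("Article_10", 6)]),
  ("healthcare", [("Article_9", 7), ("Article_15", 6)]),
  ("education", [("Article_9", 6), ("Article_10", 5)]),
  ("migration", [("Article_9", 7)]),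
  ("autonomous", [("Article_14", 7), ("Article_15", 6)])
]

-- inner 'for art, weight in mappings: if art == article: keywords.append(keyword); break'
def kwInner (article kw : String) (mappings : List (String × Int)) (keywords : List String) : List String :=
  match mappings with
  | [] => keywords
  | (art, _) :: rest => if art == article then keywords ++ [kw] else kwInner article kw rest keywords

def get_article_keywords (article : String) : List String :=
  KEYWORD_MAP.foldl (fun keywords p => kwInner article p.1 p.2 keywords) []

-- ===== PORT B =====
-- Source B's module constant _ARTICLE_INDEX: the precomputed reverse index, article -> keywords
def ARTICLE_INDEX : PySem.Dict String (List String) := PySem.Dict.mk [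
  ("Article_9", ["risk management", "risk assessment", "risk mitigation", "residual risk", "risk monitoring", "hazard", "safety", "bias", "fairness", "testing", "biometric", "facial recognition", "law enforcement", "critical infrastructure", "employment", "credit scoring", "healthcare", "education", "migration"]),
  ("Article_10", ["training data", "data governance", "data quality", "bias", "fairness", "representative", "dataset", "annotation", "labeling", "data collection", "consent", "biometric", "facial recognition", "employment", "credit scoring", "education"]),
  ("Article_12", ["logging", "audit trail", "traceability", "record keeping", "log retention", "audit", "documentation", "versioning"]),
  ("Article_14", ["human oversight", "human-in-the-loop", "human review", "manual review", "override", "intervention", "supervision", "escalation", "approval", "operator", "autonomous"]),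
  ("Article_15", ["accuracy", "robustness", "cybersecurity", "security", "adversarial", "attack", "vulnerability", "encryption", "integrity", "availability", "reliability", "testing", "healthcare", "autonomous"])
]

-- 'return list(_ARTICLE_INDEX.get(article, []))' — the list() copy is identity on immutable Lean lists
def get_article_keywords_alt (article : String) : List String :=
  ARTICLE_INDEX.getD article []

-- ===== PRECONDITION & SPEC =====
def Spec_get_article_keywords (article : String) (out : List String) : Prop := out = get_article_keywords_alt article
instance (article : String) (out : List String) : Decidable (Spec_get_article_keywords article out) := by unfold Spec_get_article_keywords; infer_instance

-- ===== CLAIM (what is proved, stated in full; the proofs are below) =====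
def Claim_equal_get_article_keywords : Prop := ∀ (article : String), Dom_get_article_keywords article → Spec_get_article_keywords article (get_article_keywords article)

-- ===== LEMMAS AND PROOFS =====

-- ===== VERDICT (by name: the statement is the Claim_ definition above) =====
set_option maxRecDepth 20000 in
theorem get_article_keywords_spec : Claim_equal_get_article_keywords := by
  intro article _
  unfold Spec_get_article_keywords
  by_cases h9 : article = "Article_9"
  · subst h9; decide
  by_cases h10 : article = "Article_10"
  · subst h10; decide
  by_cases h12 : article = "Article_12"
  · subst h12; decide
  by_cases h14 : article = "Article_14"
  · subst h14; decide
  by_cases h15 : article = "Article_15"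
  · subst h15; decide
  have f9 : (("Article_9" : String) == article) = false := by simp [Ne.symm h9]
  have f10 : (("Article_10" : String) == article) = false := by simp [Ne.symm h10]
  have f12 : (("Article_12" : String) == article) = false := by simp [Ne.symm h12]
  have f14 : (("Article_14" : String) == article) = false := by simp [Ne.symm h14]
  have f15 : (("Article_15" : String) == article) = false := by simp [Ne.symm h15]
  simp [get_article_keywords, get_article_keywords_alt, ARTICLE_INDEX, KEYWORD_MAP, kwInner,
        List.foldl, PySem.Dict.getD_eq_get?_getD, PySem.Dict.get?, f9, f10, f12, f14, f15]
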